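-- pv_equiv track=rewrite | github.com/amber132/Master-Orchestrator | master_orchestrator/task_intake.py | _first_title
-- ===== SOURCE A (Python) =====
-- def _first_title(lines: list[str], fallback: str) -> str:
--     for line in lines:
--         stripped = line.strip()
--         if stripped.startswith("#"):
--             return stripped.lstrip("#").strip() or fallback
--     for line in lines:
--         stripped = line.strip()
--         if stripped:
--             return stripped[:120]
--     return fallback
-- ===== SOURCE B (Python) =====
-- def _first_title(lines: list[str], fallback: str) -> str:
--     first_nonempty = None
--     for line in lines:
--         stripped = line.strip()
--         if stripped.startswith("#"):
--             return stripped.lstrip("#").strip() or fallback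
--         if first_nonempty is None and stripped:
--             first_nonempty = stripped
--     return fallback if first_nonempty is None else first_nonempty[:120]
-- ===== Notes on version B (the rewrite author's own statement) =====
-- stated objective: alternative
-- what changed: B replaces A's two sequential scans (one for a heading, one for the first non-empty line) by a single pass that remembers the first non-empty stripped line while still scanning to the end for a heading.
import Mathlib
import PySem

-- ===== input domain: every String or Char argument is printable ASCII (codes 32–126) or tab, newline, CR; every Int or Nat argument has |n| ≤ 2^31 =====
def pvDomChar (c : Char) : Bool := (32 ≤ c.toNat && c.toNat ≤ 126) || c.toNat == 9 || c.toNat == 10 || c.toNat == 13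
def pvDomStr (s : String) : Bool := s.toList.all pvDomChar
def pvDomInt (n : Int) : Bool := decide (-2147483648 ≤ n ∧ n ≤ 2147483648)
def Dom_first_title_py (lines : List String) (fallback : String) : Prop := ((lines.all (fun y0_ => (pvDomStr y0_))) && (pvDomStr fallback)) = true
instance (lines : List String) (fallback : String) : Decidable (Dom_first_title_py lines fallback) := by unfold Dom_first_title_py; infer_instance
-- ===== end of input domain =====

-- B merges A's two sequential scans into a single pass that remembers the first non-empty stripped line; same return value everywhere (alternative decomposition).

-- ===== PORT A =====
-- exact port of s.lstrip("#"): drop leading '#' characters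
def ftpyLstripHash (s : String) : String := String.ofList (s.toList.dropWhile (· == '#'))

-- first loop of A: return the heading title (with 'or fallback') at the first line whose strip starts with '#'
def ftpyLoop1 (fallback : String) : List String → Option String
  | [] => none
  | line :: rest =>
    let stripped := PySem.Str.strip line
    if PySem.Str.startswith stripped "#" then
      some (let t := PySem.Str.strip (ftpyLstripHash stripped); if t = "" then fallback else t)
    else ftpyLoop1 fallback rest

-- second loop of A: return stripped[:120] at the first non-empty stripped line
def ftpyLoop2 : List String → Option String
  | [] => none
  | line :: rest =>
    let stripped := PySem.Str.strip line
    if stripped ≠ "" then some (PySem.Str.slice stripped none (some 120))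
    else ftpyLoop2 rest

def first_title_py (lines : List String) (fallback : String) : String :=
  match ftpyLoop1 fallback lines with
  | some r => r
  | none =>
    match ftpyLoop2 lines with
    | some r => r
    | none => fallback

-- ===== PORT B =====
-- single pass: 'firstNonempty' is B's first_nonempty variable, set at most once
def ftpyScan (fallback : String) (firstNonempty : Option String) : List String → String
  | [] =>
    match firstNonempty with
    | none => fallback
    | some s => PySem.Str.slice s none (some 120)
  | line :: rest =>
    let stripped := PySem.Str.strip line
    if PySem.Str.startswith stripped "#" then
      let t := PySem.Str.strip (String.ofList (stripped.toList.dropWhile (· == '#')))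
      if t = "" then fallback else t
    else
      ftpyScan fallback
        (if firstNonempty = none ∧ stripped ≠ "" then some stripped else firstNonempty) rest

def first_title_py_alt (lines : List String) (fallback : String) : String :=
  ftpyScan fallback none lines

-- ===== PRECONDITION & SPEC =====
def Spec_first_title_py (lines : List String) (fallback : String) (out : String) : Prop := out = first_title_py_alt lines fallback
instance (lines : List String) (fallback : String) (out : String) : Decidable (Spec_first_title_py lines fallback out) := by unfold Spec_first_title_py; infer_instance

-- ===== CLAIM (what is proved, stated in full; the proofs are below) =====
def Claim_equal_first_title_py : Prop := ∀ (lines : List String) (fallback : String), Dom_first_title_py lines fallback → Spec_first_title_py lines fallback (first_title_py lines fallback)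

-- ===== LEMMAS AND PROOFS =====
-- loop invariant: the single pass with accumulator acc equals A's two-scan result
-- where acc pre-empts the second scan
theorem ftpyScan_eq (lines : List String) (fallback : String) (acc : Option String) :
    ftpyScan fallback acc lines =
      match ftpyLoop1 fallback lines with
      | some r => r
      | none =>
        match acc with
        | some s => PySem.Str.slice s none (some 120)
        | none =>
          match ftpyLoop2 lines with
          | some r => r
          | none => fallback := by
  induction lines generalizing acc with
  | nil => cases acc <;> simp [ftpyScan, ftpyLoop1, ftpyLoop2]
  | cons line rest ih =>
    simp only [ftpyScan, ftpyLoop1, ftpyLoop2, ftpyLstripHash]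
    by_cases h : PySem.Str.startswith (PySem.Str.strip line) "#" = true
    · rw [if_pos h]; rw [if_pos h]
    · rw [if_neg h]; rw [if_neg h]; rw [ih]
      cases acc with
      | some s => rfl
      | none =>
        by_cases hne : PySem.Str.strip line = ""
        · rw [if_neg (by simp [hne] : ¬((none : Option String) = none ∧ PySem.Str.strip line ≠ "")),
              if_neg (by simp [hne] : ¬(PySem.Str.strip line ≠ ""))]
        · rw [if_pos (⟨rfl, hne⟩ : (none : Option String) = none ∧ PySem.Str.strip line ≠ ""),
              if_pos hne]

-- ===== VERDICT (by name: the statement is the Claim_ definition above) =====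
theorem first_title_py_spec : Claim_equal_first_title_py := by
  intro lines fallback _
  unfold Spec_first_title_py first_title_py first_title_py_alt
  rw [ftpyScan_eq]
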